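-- pv_equiv track=rewrite | github.com/ZeAnswer/MotiFab | src/flowline/flow_pipes/motif_detection_pipes.py | parse_consensus_to_sets
-- ===== SOURCE A (Python) =====
-- DEGENERATE_MAP = {
--     'A': ['A'],
--     'C': ['C'],
--     'G': ['G'],
--     'T': ['T'],
--     'R': ['A', 'G'],       # Purine
--     'Y': ['C', 'T'],       # Pyrimidine
--     'M': ['A', 'C'],       # Amino
--     'K': ['G', 'T'],       # Keto
--     'S': ['C', 'G'],       # Strong
--     'W': ['A', 'T'],       # Weak
--     'B': ['C', 'G', 'T'],  # Not A
--     'D': ['A', 'G', 'T'],  # Not C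
--     'H': ['A', 'C', 'T'],  # Not G
--     'V': ['A', 'C', 'G'],  # Not T
--     'N': ['A', 'C', 'G', 'T']  # Any
-- }
--
-- def parse_consensus_to_sets(consensus):
--     """Parse a consensus string into a list of sets of allowed nucleotides at each position."""
--     allowed_sets = []
--     i = 0
--     while i < len(consensus):
--         if consensus[i] == '[':
--             closing_idx = consensus.find(']', i)
--             if closing_idx == -1:
--                 raise ValueError(f"Invalid consensus string: unclosed bracket at position {i}")
--             group = consensus[i+1:closing_idx]
--             allowed_sets.append(set(group))
--             i = closing_idx + 1
--         else:
--             if consensus[i] in DEGENERATE_MAP: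
--                 allowed_sets.append(set(DEGENERATE_MAP[consensus[i]]))
--             else:
--                 allowed_sets.append({consensus[i]})
--             i += 1
--     return allowed_sets
-- ===== SOURCE B (Python) =====
-- import re
--
-- DEGENERATE_MAP = {
--     'A': ['A'],
--     'C': ['C'],
--     'G': ['G'],
--     'T': ['T'],
--     'R': ['A', 'G'],       # Purine
--     'Y': ['C', 'T'],       # Pyrimidine
--     'M': ['A', 'C'],       # Amino
--     'K': ['G', 'T'],       # Keto
--     'S': ['C', 'G'],       # Strong
--     'W': ['A', 'T'],       # Weak
--     'B': ['C', 'G', 'T'],  # Not A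
--     'D': ['A', 'G', 'T'],  # Not C
--     'H': ['A', 'C', 'T'],  # Not G
--     'V': ['A', 'C', 'G'],  # Not T
--     'N': ['A', 'C', 'G', 'T']  # Any
-- }
--
-- _TOKEN = re.compile(r'\[[^\]]*\]|[^\[]')
--
-- def parse_consensus_to_sets(consensus):
--     """Parse a consensus string into a list of sets of allowed nucleotides at each position."""
--     allowed_sets = []
--     pos = 0
--     for m in _TOKEN.finditer(consensus):
--         if m.start() != pos:
--             # a gap means an unmatched '[' sits at pos
--             raise ValueError(f"Invalid consensus string: unclosed bracket at position {pos}")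
--         tok = m.group()
--         if tok[0] == '[':
--             allowed_sets.append(set(tok[1:-1]))
--         else:
--             allowed_sets.append(set(DEGENERATE_MAP.get(tok, [tok])))
--         pos = m.end()
--     if pos != len(consensus):
--         raise ValueError(f"Invalid consensus string: unclosed bracket at position {pos}")
--     return allowed_sets
-- ===== Notes on version B (the rewrite author's own statement) =====
-- stated objective: alternative
-- what changed: A interleaves scanning and set-building in one index-driven while loop; B first tokenizes the consensus with a regex (bracket groups or single characters), then maps each token to its nucleotide set in a second pass, detecting an unclosed '[' as a gap in the token stream; Pre_ excludes only the unclosed-bracket inputs on which both raise ValueError.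
-- outside the precondition, e.g. on parse_consensus_to_sets('['): A raises ValueError, B raises ValueError
import Mathlib
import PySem

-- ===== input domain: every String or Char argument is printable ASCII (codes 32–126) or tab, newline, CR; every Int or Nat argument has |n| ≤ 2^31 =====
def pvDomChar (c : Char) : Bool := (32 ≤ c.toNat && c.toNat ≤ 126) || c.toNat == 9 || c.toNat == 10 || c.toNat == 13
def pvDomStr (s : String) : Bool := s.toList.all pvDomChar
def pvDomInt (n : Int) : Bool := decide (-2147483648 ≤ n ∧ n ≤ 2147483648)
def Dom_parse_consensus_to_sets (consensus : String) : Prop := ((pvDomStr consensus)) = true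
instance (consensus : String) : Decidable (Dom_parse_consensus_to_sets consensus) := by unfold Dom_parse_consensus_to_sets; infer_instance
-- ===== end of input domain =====

-- B re-implements A's single index-driven scan as a regex-style tokenizer followed by a
-- token→set mapping pass; equivalence is proved on all inputs where A returns (Pre_ excludes
-- exactly the unclosed-bracket inputs, on which both Pythons raise ValueError).

-- shared module constant (DEGENERATE_MAP) and the char→1-char-string coercion
def degenerateMap : PySem.Dict String (List String) := PySem.Dict.ofList
  [("A", ["A"]), ("C", ["C"]), ("G", ["G"]), ("T", ["T"]),
   ("R", ["A", "G"]), ("Y", ["C", "T"]), ("M", ["A", "C"]), ("K", ["G", "T"]),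
   ("S", ["C", "G"]), ("W", ["A", "T"]), ("B", ["C", "G", "T"]), ("D", ["A", "G", "T"]),
   ("H", ["A", "C", "T"]), ("V", ["A", "C", "G"]), ("N", ["A", "C", "G", "T"])]

def charStr (c : Char) : String := String.ofList [c]

-- ===== PORT A =====
-- if consensus[i] in DEGENERATE_MAP: set(DEGENERATE_MAP[consensus[i]]) else {consensus[i]}
def pvSetA (c : Char) : List String :=
  match degenerateMap.get? (charStr c) with
  | some vals => PySem.Set.ofList vals
  | none => PySem.Set.ofList [charStr c]

-- the while loop of A; i is the scan index, acc the growing allowed_sets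
def loopA (cs : List Char) (i : Nat) (acc : List (List String)) : List (List String) :=
  if hi : i < cs.length then
    if hc : cs[i] = '[' then
      if hcl : PySem.Chars.findFrom cs [']'] (i : Int) none = -1 then
        []  -- Python: raise ValueError (unclosed bracket) — excluded by Pre_
      else
        loopA cs ((PySem.Chars.findFrom cs [']'] (i : Int) none).toNat + 1)
          (acc ++ [PySem.Set.ofList ((PySem.List.slice cs (some ((i : Int) + 1))
            (some (PySem.Chars.findFrom cs [']'] (i : Int) none))).map charStr)])
    else
      loopA cs (i + 1) (acc ++ [pvSetA cs[i]])
  else acc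
termination_by cs.length - i
decreasing_by
  · have h1 := (PySem.Chars.findFrom_natCast_spec cs [']'] i (le_of_lt hi) hcl).1
    omega
  · omega

def parse_consensus_to_sets (consensus : String) : List (List String) :=
  loopA consensus.toList 0 []

-- ===== PORT B =====
-- hand port of re.finditer(r'\[[^\]]*\]|[^\[]', consensus) as a token list: a bracket token
-- '[' ++ body ++ ']' (body = chars up to the first ']'), or a single non-'[' char; `none`
-- models the position gap Source B detects at an unmatched '[' (its ValueError, outside Pre_).
def tokenizeB : List Char → Option (List (List Char))
  | [] => some []
  | c :: r =>
    if c = '[' then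
      if ']' ∈ r then
        (tokenizeB ((r.dropWhile (· ≠ ']')).tail)).map
          (fun ts => ('[' :: r.takeWhile (· ≠ ']') ++ [']']) :: ts)
      else none
    else
      (tokenizeB r).map (fun ts => [c] :: ts)
termination_by l => l.length
decreasing_by
  · have h1 := List.length_dropWhile_le (· ≠ ']') r
    simp only [List.length_tail, List.length_cons]
    omega
  · simp

-- set(DEGENERATE_MAP.get(tok, [tok]))
def pvSetB (c : Char) : List String :=
  PySem.Set.ofList (degenerateMap.getD (charStr c) [charStr c])

-- set(tok[1:-1]) if tok[0] == '[' else set(DEGENERATE_MAP.get(tok, [tok]))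
def tokenToSet : List Char → List String
  | [] => []  -- unreachable: regex tokens are nonempty
  | c :: rest =>
    if c = '[' then PySem.Set.ofList (rest.dropLast.map charStr) else pvSetB c

def parse_consensus_to_sets_alt (consensus : String) : List (List String) :=
  match tokenizeB consensus.toList with
  | some ts => ts.map tokenToSet
  | none => []  -- Source B: raise ValueError (unclosed bracket) — excluded by Pre_

-- ===== PRECONDITION & SPEC =====
-- Pre_ excludes exactly the inputs with an unclosed bracket — a '[' with no ']' after it —
-- on which Python A raises ValueError (and Source B raises the same ValueError).
def Pre_parse_consensus_to_sets (consensus : String) : Prop :=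
  ∀ i < consensus.toList.length,
    consensus.toList[i]? = some '[' → ']' ∈ consensus.toList.drop (i + 1)
instance (consensus : String) : Decidable (Pre_parse_consensus_to_sets consensus) := by
  unfold Pre_parse_consensus_to_sets; infer_instance

def pvWitness_parse_consensus_to_sets : String := "A[CG]N"

def Spec_parse_consensus_to_sets (consensus : String) (out : List (List String)) : Prop :=
  out = parse_consensus_to_sets_alt consensus
instance (consensus : String) (out : List (List String)) : Decidable (Spec_parse_consensus_to_sets consensus out) := by
  unfold Spec_parse_consensus_to_sets; infer_instance

-- ===== CLAIM (what is proved, stated in full; the proofs are below) =====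
def Claim_equal_parse_consensus_to_sets : Prop :=
  ∀ (consensus : String), Dom_parse_consensus_to_sets consensus →
    Pre_parse_consensus_to_sets consensus →
    Spec_parse_consensus_to_sets consensus (parse_consensus_to_sets consensus)

-- ===== LEMMAS AND PROOFS =====

lemma pv_set_eq (c : Char) : pvSetB c = pvSetA c := by
  unfold pvSetA pvSetB PySem.Dict.getD
  cases h : degenerateMap.get? (charStr c) <;> simp

lemma pv_dropWhile_eq_drop (p : Char → Bool) (l : List Char) :
    l.dropWhile p = l.drop (l.takeWhile p).length := by
  induction l with
  | nil => simp
  | cons a l ih => by_cases hp : p a <;> simp [hp, ih]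

-- first occurrence of a present character, as a takeWhile length
lemma pv_find_singleton (l : List Char) (c : Char) (h : c ∈ l) :
    PySem.Chars.find l [c] = ((l.takeWhile (· ≠ c)).length : Int) := by
  have hinf : [c] <:+: l := (List.singleton_infix_iff c l).mpr h
  have hnn : 0 ≤ PySem.Chars.find l [c] := (PySem.Chars.find_nonneg_iff l [c]).mpr hinf
  obtain ⟨hpre, hmin⟩ := PySem.Chars.find_spec (s := l) (sub := [c]) hnn
  set t := (PySem.Chars.find l [c]).toNat with ht
  set w := (l.takeWhile (· ≠ c)).length with hw
  have hd : l.dropWhile (· ≠ c) ≠ [] := by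
    intro h0
    have hsplit := List.takeWhile_append_dropWhile (p := (· ≠ c)) (l := l)
    rw [h0, List.append_nil] at hsplit
    have hc := List.mem_takeWhile_imp (p := (· ≠ c)) (l := l) (by rw [← hsplit] at h; exact h)
    simp at hc
  have hdrop_eq : l.drop w = l.dropWhile (· ≠ c) := (pv_dropWhile_eq_drop _ l).symm
  have hwlen : w ≤ l.length := hw ▸ (List.takeWhile_prefix _).length_le
  have hle1 : w ≤ t := by
    by_contra hlt'
    have hlt : t < w := by omega
    -- t < w : l[t] lies inside the takeWhile prefix, yet equals c
    obtain ⟨u, hu⟩ := hpre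
    have hhead : (l.drop t).head? = some c := by rw [← hu]; rfl
    rw [List.head?_drop] at hhead
    have htw : t < (l.takeWhile (· ≠ c)).length := hlt
    have hmem : (l.takeWhile (· ≠ c))[t] ∈ l.takeWhile (· ≠ c) := List.getElem_mem _
    have hpref : (l.takeWhile (· ≠ c))[t] = l[t]'(by omega) :=
      (List.takeWhile_prefix _).getElem htw
    have hne := List.mem_takeWhile_imp hmem
    rw [hpref] at hne
    have : l[t]? = some (l[t]'(by omega)) := List.getElem?_eq_getElem _
    rw [this] at hhead
    simp at hne hhead
    exact hne hhead
  have hle2 : t ≤ w := by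
    by_contra hlt'
    have hlt : w < t := by omega
    have hnp := hmin w hlt
    apply hnp
    obtain ⟨a, as, hcons⟩ := List.exists_cons_of_ne_nil hd
    have hhc := List.head_dropWhile_not (· ≠ c) hd
    have hha : (l.dropWhile (· ≠ c)).head hd = a := by
      have h1 : (l.dropWhile (· ≠ c)).head? = some a := by rw [hcons]; rfl
      rw [List.head?_eq_some_head hd] at h1
      exact Option.some.inj h1
    rw [hha] at hhc
    simp at hhc
    refine ⟨as, ?_⟩
    rw [hdrop_eq, hcons, hhc]
    rfl
  have : t = w := le_antisymm hle2 hle1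
  omega

lemma pv_loopA_base (cs : List Char) (acc : List (List String)) (ts : List (List Char))
    (htok : tokenizeB (cs.drop cs.length) = some ts) :
    loopA cs cs.length acc = acc ++ ts.map tokenToSet := by
  rw [List.drop_length] at htok
  have hts : ts = [] := by simpa [tokenizeB] using htok.symm
  subst hts
  rw [loopA]
  simp

-- the loop of A, started at index i, produces B's sets for the tokens of the suffix cs.drop i
lemma pv_loopA_eq (cs : List Char) :
    ∀ n i acc ts, cs.length - i ≤ n → i ≤ cs.length →
      tokenizeB (cs.drop i) = some ts →
      loopA cs i acc = acc ++ ts.map tokenToSet := by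
  intro n
  induction n with
  | zero =>
    intro i acc ts hn hi htok
    have hie : i = cs.length := by omega
    subst hie
    exact pv_loopA_base cs acc ts htok
  | succ n ih =>
    intro i acc ts hn hi htok
    by_cases hilt : i < cs.length
    · have hdrop : cs.drop i = cs[i] :: cs.drop (i + 1) := List.drop_eq_getElem_cons hilt
      by_cases hc : cs[i] = '['
      · rw [hdrop, hc] at htok
        simp only [tokenizeB] at htok
        by_cases hm : ']' ∈ cs.drop (i + 1)
        · rw [if_pos hm] at htok
          obtain ⟨ts', hts', hmap⟩ := Option.map_eq_some_iff.mp htok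
          subst hmap
          set w := ((cs.drop (i + 1)).takeWhile (· ≠ ']')).length with hw
          have hfind : PySem.Chars.findFrom cs [']'] (i : Int) none = ((i + w + 1 : Nat) : Int) := by
            rw [PySem.Chars.findFrom_natCast cs [']'] i (le_of_lt hilt)]
            have hmem : ']' ∈ cs.drop i := by
              rw [hdrop]; exact List.mem_cons_of_mem _ hm
            rw [pv_find_singleton _ _ hmem, hdrop, hc]
            rw [if_neg (by omega)]
            have htw : (('[' : Char) :: cs.drop (i + 1)).takeWhile (· ≠ ']')
                = '[' :: (cs.drop (i + 1)).takeWhile (· ≠ ']') := by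
              simp
            rw [htw, List.length_cons, ← hw]
            omega
          rw [loopA, dif_pos hilt, dif_pos hc, hfind]
          rw [dif_neg (by omega)]
          have hslice : PySem.List.slice cs (some ((i : Int) + 1)) (some ((i + w + 1 : Nat) : Int))
              = (cs.drop (i + 1)).takeWhile (· ≠ ']') := by
            have hcast : ((i : Int) + 1) = ((i + 1 : Nat) : Int) := by push_cast; ring
            rw [hcast, PySem.List.slice_natCast]
            have hsub : (i + w + 1) - (i + 1) = w := by omega
            rw [hsub, hw]
            exact (List.prefix_iff_eq_take.mp (List.takeWhile_prefix _)).symm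
          have hwlt : w < (cs.drop (i + 1)).length := by
            have hdne : (cs.drop (i + 1)).dropWhile (· ≠ ']') ≠ [] := by
              intro h0
              have hsp := List.takeWhile_append_dropWhile (p := (· ≠ ']')) (l := cs.drop (i + 1))
              rw [h0, List.append_nil] at hsp
              have := List.mem_takeWhile_imp (p := (· ≠ ']')) (by rw [← hsp] at hm; exact hm)
              simp at this
            rw [pv_dropWhile_eq_drop] at hdne
            by_contra hge
            exact hdne (List.drop_eq_nil_of_le (by omega))
          have hlen : (cs.drop (i + 1)).length = cs.length - (i + 1) := List.length_drop
          have htoNat : (((i + w + 1 : Nat) : Int)).toNat + 1 = i + w + 2 := by omega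
          have htl : cs.drop (i + w + 2) = ((cs.drop (i + 1)).dropWhile (· ≠ ']')).tail := by
            rw [pv_dropWhile_eq_drop, List.tail_drop, List.drop_drop, ← hw]
            congr 1
            omega
          rw [htoNat, hslice]
          rw [ih (i + w + 2) _ ts' (by omega) (by omega) (by rw [htl]; exact hts')]
          simp [tokenToSet]
        · rw [if_neg hm] at htok
          exact absurd htok (by simp)
      · rw [hdrop] at htok
        simp only [tokenizeB, if_neg hc] at htok
        obtain ⟨ts', hts', hmap⟩ := Option.map_eq_some_iff.mp htok
        subst hmap
        rw [loopA, dif_pos hilt, dif_neg hc]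
        rw [ih (i + 1) _ ts' (by omega) (by omega) hts']
        simp [tokenToSet, hc, pv_set_eq]
    · have hie : i = cs.length := by omega
      subst hie
      exact pv_loopA_base cs acc ts htok

-- the bracket-closure precondition passes to suffixes
lemma pv_pre_drop (l : List Char) (k : Nat)
    (h : ∀ i < l.length, l[i]? = some '[' → ']' ∈ l.drop (i + 1)) :
    ∀ i < (l.drop k).length, (l.drop k)[i]? = some '[' → ']' ∈ (l.drop k).drop (i + 1) := by
  intro i hi hc
  rw [List.getElem?_drop] at hc
  rw [List.drop_drop]
  have := h (k + i) (by have h2 := hi; simp [List.length_drop] at h2; omega) hc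
  simpa [Nat.add_assoc] using this

-- under the precondition the tokenizer succeeds
lemma pv_tok_some : ∀ (n : Nat) (l : List Char), l.length ≤ n →
    (∀ i < l.length, l[i]? = some '[' → ']' ∈ l.drop (i + 1)) →
    (tokenizeB l).isSome := by
  intro n
  induction n with
  | zero =>
    intro l hl _
    have : l = [] := List.eq_nil_of_length_eq_zero (by omega)
    subst this
    simp [tokenizeB]
  | succ n ih =>
    intro l hl h
    cases l with
    | nil => simp [tokenizeB]
    | cons c r =>
      have hr : ∀ i < r.length, r[i]? = some '[' → ']' ∈ r.drop (i + 1) := by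
        have := pv_pre_drop (c :: r) 1 h
        simpa using this
      by_cases hc : c = '['
      · have hm : ']' ∈ r := by
          have := h 0 (by simp) (by simp [hc])
          simpa using this
        have htail : (r.dropWhile (· ≠ ']')).tail
            = r.drop ((r.takeWhile (· ≠ ']')).length + 1) := by
          rw [pv_dropWhile_eq_drop, List.tail_drop]
        simp only [tokenizeB, if_pos hc, if_pos hm, Option.isSome_map]
        rw [htail]
        refine ih _ ?_ (pv_pre_drop r _ hr)
        simp at hl ⊢
        omega
      · simp only [tokenizeB, if_neg hc, Option.isSome_map]
        refine ih r ?_ hr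
        simp at hl
        omega

-- ===== VERDICT (by name: the statement is the Claim_ definition above) =====
theorem parse_consensus_to_sets_spec : Claim_equal_parse_consensus_to_sets := by
  intro consensus _ hpre
  unfold Spec_parse_consensus_to_sets parse_consensus_to_sets parse_consensus_to_sets_alt
  have hs := pv_tok_some consensus.toList.length consensus.toList le_rfl hpre
  obtain ⟨ts, hts⟩ := Option.isSome_iff_exists.mp hs
  rw [hts]
  exact pv_loopA_eq consensus.toList consensus.toList.length 0 [] ts (by omega) (by omega)
    (by simpa using hts)
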